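-- pv_equiv track=rewrite | github.com/mrubio-chavarria/simplified_algorithm | source/ncbf_utils.py | ncbf_recursive
-- ===== SOURCE A (Python) =====
-- def ncbf_recursive(group1, group2, n_elements, path=[]):
--     """
--     DESCRIPTION:
--     The algorithm that computes all the possible NCBF for a given node.
--     :param group1: [list] possible layers to build a NCBF. Initially this
--     group was the activators.
--     :param group2: [list] possible layers to build a NCBF. Initially this
--     group was the inhibitors.
--     :param n_elements: [int] number of nodes that should gather all the
--     layers in every NCBF.
--     :param path: [list] the layers, that share all the developed NCBF.
--     :return: [list] all the NCBFs obtained from this path with these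
--     activators and inhibitors.
--     """
--     # Helper functions
--     def kernel(layer):
--         """
--         DESCRIPTION:
--         A function to filter all the layers that should be discarded
--         because the nodes that they gather have been used.
--         :param layer: [str] the layer that is in test.
--         :return: [bool] result of the test.
--         """
--         forbidden_elements = set(group1[i])
--         layer_elements = set(list(layer))
--         return not bool(layer_elements & forbidden_elements)
--
--     if group1:
--         # Recursive case
--         ncbfs = []
--         if not group2:
--             group1 = [layer for layer in group1
--                 if len(''.join(path)) +  len(layer) == n_elements]
--         for i in range(len(group1)):
--             # Filter for incompatible types
--             new_group1 = list(filter(kernel, group1))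
--             ncbfs.append(
--                 ncbf_recursive(group2, new_group1, n_elements, path + [group1[i]])
--                 )
--         ncbfs = [it for sb in ncbfs for it in sb]
--     else:
--         # Base case
--         if group2:
--             ncbfs = [path + [layer] for layer in group2
--                 if len(''.join(path)) +  len(layer) == n_elements]
--         else:
--             ncbfs = [path]
--     return ncbfs
-- ===== SOURCE B (Python) =====
-- def ncbf_recursive(group1, group2, n_elements, path=[]):
--     """Iterative re-implementation: explicit DFS stack of (group1, group2, path)
--     frames instead of recursion; completed NCBFs are appended to a single
--     result list in the original left-to-right DFS order."""
--     result = []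
--     stack = [(list(group1), list(group2), list(path))]
--     while stack:
--         g1, g2, p = stack.pop()
--         if g1:
--             if not g2:
--                 g1 = [layer for layer in g1
--                       if len(''.join(p)) + len(layer) == n_elements]
--             children = []
--             for pick in g1:
--                 new_g1 = [layer for layer in g1 if not (set(layer) & set(pick))]
--                 children.append((g2, new_g1, p + [pick]))
--             stack.extend(reversed(children))
--         elif g2:
--             result.extend(p + [layer] for layer in g2
--                           if len(''.join(p)) + len(layer) == n_elements)
--         else:
--             result.append(p)
--     return result
-- ===== Notes on version B (the rewrite author's own statement) =====
-- stated objective: alternative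
-- what changed: The recursive DFS (recursion swapping the two groups, building per-branch lists and flattening) is replaced by an iterative worklist loop over an explicit stack of (group1, group2, path) frames that appends finished NCBFs to one result accumulator in the same left-to-right order; Pre_ excludes only the inputs with an empty-string layer in both groups, on which A recurses forever and raises RecursionError.
import Mathlib
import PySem

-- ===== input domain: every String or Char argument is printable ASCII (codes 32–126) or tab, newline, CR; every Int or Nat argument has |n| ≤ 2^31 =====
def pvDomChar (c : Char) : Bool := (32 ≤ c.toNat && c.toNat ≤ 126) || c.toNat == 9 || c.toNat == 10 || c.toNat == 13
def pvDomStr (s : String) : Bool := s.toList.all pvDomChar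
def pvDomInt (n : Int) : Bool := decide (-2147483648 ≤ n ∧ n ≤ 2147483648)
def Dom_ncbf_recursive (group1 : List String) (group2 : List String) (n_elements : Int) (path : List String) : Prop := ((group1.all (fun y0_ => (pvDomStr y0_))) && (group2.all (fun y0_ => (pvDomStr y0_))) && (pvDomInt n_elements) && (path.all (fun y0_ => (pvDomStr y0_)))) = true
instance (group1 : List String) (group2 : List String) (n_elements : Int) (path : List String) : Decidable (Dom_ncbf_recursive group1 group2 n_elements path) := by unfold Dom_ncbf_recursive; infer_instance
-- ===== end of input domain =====

-- B replaces A's recursive DFS by an iterative worklist over an explicit stack of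
-- (group1, group2, path) frames (alternative decomposition, same cost, same output order).

-- Shared helpers: both Pythons contain these identical expressions.
-- len(''.join(path)) + len(layer) == n_elements
def pvLenOK (n : Int) (path : List String) (layer : String) : Bool :=
  PySem.Str.len (PySem.Str.join "" path) + PySem.Str.len layer == n
-- kernel: not bool(set(layer) & set(pick))
def pvKernel (pick layer : String) : Bool :=
  (PySem.Set.inter (PySem.Set.ofList layer.toList) (PySem.Set.ofList pick.toList)).isEmpty
-- the trim both Pythons apply to group1 when group2 is empty
def pvTrim (n : Int) (p : List String) (g1 g2 : List String) : List String :=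
  if g2 = [] then g1.filter (pvLenOK n p) else g1

-- ===== PORT A =====
-- A's recursion, made total with a fuel argument (structural on fuel; under
-- Pre_ the fuel 2(|group1|+|group2|)+2 is proved sufficient, fuel 0 is unreachable).
def pvNcbfF (n : Int) : Nat → List String → List String → List String → List (List String)
  | 0, _, _, _ => []
  | f+1, g1, g2, path =>
    if g1 ≠ [] then
      -- recursive case: optional trim, then one recursive call per remaining layer, flattened
      ((pvTrim n path g1 g2).map (fun gi =>
        pvNcbfF n f g2 ((pvTrim n path g1 g2).filter (pvKernel gi)) (path ++ [gi]))).flatten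
    else
      -- base case
      if g2 ≠ [] then
        g2.filterMap (fun layer => if pvLenOK n path layer then some (path ++ [layer]) else none)
      else [path]

def ncbf_recursive (group1 : List String) (group2 : List String) (n_elements : Int) (path : List String) : List (List String) :=
  pvNcbfF n_elements (2 * (group1.length + group2.length) + 2) group1 group2 path

-- ===== PORT B =====
-- the child frames a popped frame pushes (in processing order; Lean list head = stack top)
def pvChildren (n : Int) (g1 g2 p : List String) : List (List String × List String × List String) :=
  (pvTrim n p g1 g2).map (fun pick => (g2, (pvTrim n p g1 g2).filter (pvKernel pick), p ++ [pick]))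

-- B's while-loop over the explicit stack, made total with a fuel counter
-- (one unit per popped frame; under Pre_ the factorial fuel is proved sufficient).
def pvRunB (n : Int) : Nat → List (List String × List String × List String) → List (List String) → List (List String)
  | 0, _, res => res
  | _+1, [], res => res
  | f+1, (g1, g2, p) :: rest, res =>
    if g1 ≠ [] then
      pvRunB n f (pvChildren n g1 g2 p ++ rest) res
    else if g2 ≠ [] then
      pvRunB n f rest (res ++ g2.filterMap (fun layer => if pvLenOK n p layer then some (p ++ [layer]) else none))
    else
      pvRunB n f rest (res ++ [p])

def ncbf_recursive_alt (group1 : List String) (group2 : List String) (n_elements : Int) (path : List String) : List (List String) :=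
  pvRunB n_elements (Nat.factorial (2 * (group1.length + group2.length) + 2)) [(group1, group2, path)] []

-- ===== PRECONDITION & SPEC =====
-- Pre_ excludes exactly the inputs with an empty-string layer in BOTH groups: there
-- the empty layer survives its own disjointness filter in either group, A's recursion
-- never shrinks along that branch and Python raises RecursionError (A returns no value).
def Pre_ncbf_recursive (group1 : List String) (group2 : List String) (n_elements : Int) (path : List String) : Prop :=
  ¬ ("" ∈ group1 ∧ "" ∈ group2)
instance (group1 : List String) (group2 : List String) (n_elements : Int) (path : List String) : Decidable (Pre_ncbf_recursive group1 group2 n_elements path) := by unfold Pre_ncbf_recursive; infer_instance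

def pvWitness_ncbf_recursive : List String × List String × Int × List String :=
  (["ab", "c"], ["abc"], 3, [])

def Spec_ncbf_recursive (group1 : List String) (group2 : List String) (n_elements : Int) (path : List String) (out : List (List String)) : Prop := out = ncbf_recursive_alt group1 group2 n_elements path
instance (group1 : List String) (group2 : List String) (n_elements : Int) (path : List String) (out : List (List String)) : Decidable (Spec_ncbf_recursive group1 group2 n_elements path out) := by unfold Spec_ncbf_recursive; infer_instance

-- ===== CLAIM (what is proved, stated in full; the proofs are below) =====
def Claim_equal_ncbf_recursive : Prop := ∀ (group1 : List String) (group2 : List String) (n_elements : Int) (path : List String), Dom_ncbf_recursive group1 group2 n_elements path → Pre_ncbf_recursive group1 group2 n_elements path → Spec_ncbf_recursive group1 group2 n_elements path (ncbf_recursive group1 group2 n_elements path)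

-- ===== LEMMAS AND PROOFS =====

-- the frame condition Pre_ states, and the termination measure of A's recursion
def pvG (g1 g2 : List String) : Prop := ¬ ("" ∈ g1 ∧ "" ∈ g2)

def pvM (g1 g2 : List String) : Nat := 2 * (g1.length + g2.length) + (if "" ∈ g1 then 1 else 0)

-- a nonempty layer is never disjoint from itself
lemma pvKernel_self_false (s : String) (hs : s ≠ "") : pvKernel s s = false := by
  unfold pvKernel
  rw [List.isEmpty_eq_false_iff_exists_mem]
  have h1 : s.toList ≠ [] := by
    intro h; exact hs (String.toList_eq_nil_iff.mp h)
  obtain ⟨c, cs, h⟩ := List.exists_cons_of_ne_nil h1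
  refine ⟨c, ?_⟩
  have hc : c ∈ s.toList := by rw [h]; exact List.mem_cons_self
  simp [pysem, hc]

lemma pvTrim_sublist (n : Int) (p g1 g2 : List String) : (pvTrim n p g1 g2).Sublist g1 := by
  unfold pvTrim; split
  · exact List.filter_sublist
  · exact List.Sublist.refl g1

lemma pvFilter_lt (gi : String) (l : List String) (hne : "" ∉ l) (hmem : gi ∈ l) :
    (l.filter (pvKernel gi)).length < l.length := by
  rcases Nat.lt_or_ge (l.filter (pvKernel gi)).length l.length with h' | h'
  · exact h'
  · exfalso
    have he : l.filter (pvKernel gi) = l :=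
      List.Sublist.eq_of_length_le (List.filter_sublist (p := pvKernel gi) (l := l)) h'
    have hm : gi ∈ l.filter (pvKernel gi) := by rw [he]; exact hmem
    rw [List.mem_filter] at hm
    have : gi ≠ "" := fun h => hne (h ▸ hmem)
    rw [pvKernel_self_false gi this] at hm
    simp at hm

-- a child frame of a good recursive-case frame is good and strictly smaller
lemma pvChild_good (n : Int) (path g1 g2 : List String) (hG : pvG g1 g2)
    (gi : String) : pvG g2 ((pvTrim n path g1 g2).filter (pvKernel gi)) := by
  intro ⟨hin2, hinf⟩
  exact hG ⟨(pvTrim_sublist n path g1 g2).subset (List.mem_of_mem_filter hinf), hin2⟩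

lemma pvChild_m (n : Int) (path g1 g2 : List String) (hG : pvG g1 g2)
    (gi : String) (hgi : gi ∈ pvTrim n path g1 g2) :
    pvM g2 ((pvTrim n path g1 g2).filter (pvKernel gi)) < pvM g1 g2 := by
  have hsub := pvTrim_sublist n path g1 g2
  have hlen := hsub.length_le
  have hflen := (List.filter_sublist (p := pvKernel gi) (l := pvTrim n path g1 g2)).length_le
  unfold pvM
  by_cases h1 : "" ∈ g1
  · have h2 : "" ∉ g2 := fun h => hG ⟨h1, h⟩
    rw [if_pos h1, if_neg h2]
    omega
  · have hnt : "" ∉ pvTrim n path g1 g2 := fun h => h1 (hsub.subset h)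
    have hlt := pvFilter_lt gi (pvTrim n path g1 g2) hnt hgi
    rw [if_neg h1]
    split <;> omega

-- one-step unfolding of A's fuelled recursion (cited by the proofs below)
lemma pvNcbfF_succ (n : Int) (f : Nat) (g1 g2 path : List String) :
    pvNcbfF n (f+1) g1 g2 path =
      if g1 ≠ [] then
        ((pvTrim n path g1 g2).map (fun gi =>
          pvNcbfF n f g2 ((pvTrim n path g1 g2).filter (pvKernel gi)) (path ++ [gi]))).flatten
      else
        if g2 ≠ [] then
          g2.filterMap (fun layer => if pvLenOK n path layer then some (path ++ [layer]) else none)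
        else [path] := by
  simp only [pvNcbfF]

-- fuel-irrelevance for A's recursion, above the measure
lemma pvNcbfF_stable (n : Int) : ∀ f1 f2 g1 g2 path, pvG g1 g2 →
    pvM g1 g2 < f1 → pvM g1 g2 < f2 →
    pvNcbfF n f1 g1 g2 path = pvNcbfF n f2 g1 g2 path := by
  intro f1
  induction f1 using Nat.strong_induction_on with
  | _ f1 IH =>
    intro f2 g1 g2 path hG hf1 hf2
    obtain ⟨a, rfl⟩ : ∃ a, f1 = a + 1 := ⟨f1 - 1, by omega⟩
    obtain ⟨b, rfl⟩ : ∃ b, f2 = b + 1 := ⟨f2 - 1, by omega⟩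
    rw [pvNcbfF_succ, pvNcbfF_succ]
    by_cases hg : g1 ≠ []
    · rw [if_pos hg, if_pos hg]
      congr 1
      apply List.map_congr_left
      intro gi hgi
      have hGc := pvChild_good n path g1 g2 hG gi
      have hm := pvChild_m n path g1 g2 hG gi hgi
      have e1 : pvNcbfF n a g2 ((pvTrim n path g1 g2).filter (pvKernel gi)) (path ++ [gi])
          = pvNcbfF n (pvM g2 ((pvTrim n path g1 g2).filter (pvKernel gi)) + 1)
              g2 ((pvTrim n path g1 g2).filter (pvKernel gi)) (path ++ [gi]) :=
        IH a (by omega) _ _ _ _ hGc (by omega) (by omega)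
      have e2 : pvNcbfF n b g2 ((pvTrim n path g1 g2).filter (pvKernel gi)) (path ++ [gi])
          = pvNcbfF n (pvM g2 ((pvTrim n path g1 g2).filter (pvKernel gi)) + 1)
              g2 ((pvTrim n path g1 g2).filter (pvKernel gi)) (path ++ [gi]) := by
        by_cases hb : b < a + 1
        · exact IH b hb _ _ _ _ hGc (by omega) (by omega)
        · exact (IH (pvM g2 ((pvTrim n path g1 g2).filter (pvKernel gi)) + 1)
            (by omega) b g2 ((pvTrim n path g1 g2).filter (pvKernel gi)) (path ++ [gi])
            hGc (by omega) (by omega)).symm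
      rw [e1, e2]
    · rw [if_neg hg, if_neg hg]

-- pop count of A's recursion tree, fuel-indexed like A
def pvCnt (n : Int) : Nat → List String → List String → List String → Nat
  | 0, _, _, _ => 1
  | f+1, g1, g2, path =>
    if g1 ≠ [] then
      1 + ((pvTrim n path g1 g2).map (fun gi =>
        pvCnt n f g2 ((pvTrim n path g1 g2).filter (pvKernel gi)) (path ++ [gi]))).sum
    else 1

lemma pvCnt_succ (n : Int) (f : Nat) (g1 g2 path : List String) :
    pvCnt n (f+1) g1 g2 path =
      if g1 ≠ [] then
        1 + ((pvTrim n path g1 g2).map (fun gi =>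
          pvCnt n f g2 ((pvTrim n path g1 g2).filter (pvKernel gi)) (path ++ [gi]))).sum
      else 1 := by
  simp only [pvCnt]

lemma pvCnt_pos (n : Int) (f : Nat) (g1 g2 p : List String) : 1 ≤ pvCnt n f g1 g2 p := by
  cases f with
  | zero => simp [pvCnt]
  | succ k =>
    rw [pvCnt_succ]
    split <;> omega

lemma pvCnt_stable (n : Int) : ∀ f1 f2 g1 g2 path, pvG g1 g2 →
    pvM g1 g2 < f1 → pvM g1 g2 < f2 →
    pvCnt n f1 g1 g2 path = pvCnt n f2 g1 g2 path := by
  intro f1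
  induction f1 using Nat.strong_induction_on with
  | _ f1 IH =>
    intro f2 g1 g2 path hG hf1 hf2
    obtain ⟨a, rfl⟩ : ∃ a, f1 = a + 1 := ⟨f1 - 1, by omega⟩
    obtain ⟨b, rfl⟩ : ∃ b, f2 = b + 1 := ⟨f2 - 1, by omega⟩
    rw [pvCnt_succ, pvCnt_succ]
    by_cases hg : g1 ≠ []
    · rw [if_pos hg, if_pos hg]
      congr 1
      apply congrArg List.sum
      apply List.map_congr_left
      intro gi hgi
      have hGc := pvChild_good n path g1 g2 hG gi
      have hm := pvChild_m n path g1 g2 hG gi hgi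
      have e1 : pvCnt n a g2 ((pvTrim n path g1 g2).filter (pvKernel gi)) (path ++ [gi])
          = pvCnt n (pvM g2 ((pvTrim n path g1 g2).filter (pvKernel gi)) + 1)
              g2 ((pvTrim n path g1 g2).filter (pvKernel gi)) (path ++ [gi]) :=
        IH a (by omega) _ _ _ _ hGc (by omega) (by omega)
      have e2 : pvCnt n b g2 ((pvTrim n path g1 g2).filter (pvKernel gi)) (path ++ [gi])
          = pvCnt n (pvM g2 ((pvTrim n path g1 g2).filter (pvKernel gi)) + 1)
              g2 ((pvTrim n path g1 g2).filter (pvKernel gi)) (path ++ [gi]) := by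
        by_cases hb : b < a + 1
        · exact IH b hb _ _ _ _ hGc (by omega) (by omega)
        · exact (IH (pvM g2 ((pvTrim n path g1 g2).filter (pvKernel gi)) + 1)
            (by omega) b g2 ((pvTrim n path g1 g2).filter (pvKernel gi)) (path ++ [gi])
            hGc (by omega) (by omega)).symm
      rw [e1, e2]
    · rw [if_neg hg, if_neg hg]

lemma pvCnt_le_factorial (n : Int) : ∀ k g1 g2 p, pvG g1 g2 →
    pvM g1 g2 ≤ k →
    pvCnt n (pvM g1 g2 + 1) g1 g2 p ≤ Nat.factorial (k + 1) := by
  intro k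
  induction k with
  | zero =>
    intro g1 g2 p _ hk
    have hg1 : g1 = [] := List.length_eq_zero_iff.mp (by unfold pvM at hk; omega)
    subst hg1
    rw [pvCnt_succ]
    simp
  | succ k IHk =>
    intro g1 g2 p hG hk
    rw [pvCnt_succ]
    by_cases hg : g1 ≠ []
    · rw [if_pos hg]
      have hbound : ∀ x ∈ (pvTrim n p g1 g2).map (fun gi =>
          pvCnt n (pvM g1 g2) g2 ((pvTrim n p g1 g2).filter (pvKernel gi)) (p ++ [gi])),
          x ≤ Nat.factorial (k + 1) := by
        intro x hx
        rw [List.mem_map] at hx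
        obtain ⟨gi, hgi, rfl⟩ := hx
        have hGc := pvChild_good n p g1 g2 hG gi
        have hm := pvChild_m n p g1 g2 hG gi hgi
        have estab : pvCnt n (pvM g1 g2) g2
            ((pvTrim n p g1 g2).filter (pvKernel gi)) (p ++ [gi])
            = pvCnt n (pvM g2 ((pvTrim n p g1 g2).filter (pvKernel gi)) + 1) g2
              ((pvTrim n p g1 g2).filter (pvKernel gi)) (p ++ [gi]) :=
          pvCnt_stable n _ _ _ _ _ hGc (by omega) (by omega)
        rw [estab]
        exact IHk g2 ((pvTrim n p g1 g2).filter (pvKernel gi)) (p ++ [gi]) hGc (by omega)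
      have hsum := List.sum_le_card_nsmul _ _ hbound
      rw [List.length_map, smul_eq_mul] at hsum
      have hlen : (pvTrim n p g1 g2).length ≤ k + 1 := by
        have h1 := (pvTrim_sublist n p g1 g2).length_le
        have h2 : 2 * (g1.length + g2.length) ≤ pvM g1 g2 := by unfold pvM; split <;> omega
        omega
      have hmul : (pvTrim n p g1 g2).length * Nat.factorial (k + 1)
          ≤ (k + 1) * Nat.factorial (k + 1) := Nat.mul_le_mul_right _ hlen
      have hfact : Nat.factorial (k + 1 + 1) = (k + 2) * Nat.factorial (k + 1) := rfl
      have hsplit : (k + 2) * Nat.factorial (k + 1)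
          = (k + 1) * Nat.factorial (k + 1) + Nat.factorial (k + 1) := by ring
      have hfpos : 1 ≤ Nat.factorial (k + 1) := Nat.one_le_iff_ne_zero.mpr (Nat.factorial_ne_zero _)
      omega
    · rw [if_neg hg]
      exact Nat.one_le_iff_ne_zero.mpr (Nat.factorial_ne_zero _)

-- cost / goodness of a whole stack
def pvCostSt (n : Int) (st : List (List String × List String × List String)) : Nat :=
  (st.map (fun fr => pvCnt n (pvM fr.1 fr.2.1 + 1) fr.1 fr.2.1 fr.2.2)).sum

def pvGoodSt (st : List (List String × List String × List String)) : Prop :=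
  ∀ fr ∈ st, pvG fr.1 fr.2.1

-- one unfolding of A at its port fuel, recursive case, children back at port fuel
lemma pvA_unfold_rec (n : Int) (g1 g2 p : List String) (hG : pvG g1 g2)
    (hg : g1 ≠ []) :
    ncbf_recursive g1 g2 n p = ((pvTrim n p g1 g2).map (fun gi =>
      ncbf_recursive g2 ((pvTrim n p g1 g2).filter (pvKernel gi)) n (p ++ [gi]))).flatten := by
  have hMb : pvM g1 g2 < 2 * (g1.length + g2.length) + 2 := by unfold pvM; split <;> omega
  simp only [ncbf_recursive]
  rw [pvNcbfF_stable n (2 * (g1.length + g2.length) + 2) (pvM g1 g2 + 1) g1 g2 p hG hMb (by omega)]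
  rw [pvNcbfF_succ, if_pos hg]
  congr 1
  apply List.map_congr_left
  intro gi hgi
  have hGc := pvChild_good n p g1 g2 hG gi
  have hm := pvChild_m n p g1 g2 hG gi hgi
  have hMc : pvM g2 ((pvTrim n p g1 g2).filter (pvKernel gi))
      < 2 * (g2.length + ((pvTrim n p g1 g2).filter (pvKernel gi)).length) + 2 := by
    unfold pvM; split <;> omega
  exact pvNcbfF_stable n _ _ _ _ _ hGc (by omega) hMc

-- one unfolding of the per-frame cost, recursive case, children at canonical fuel
lemma pvCnt_unfold_rec (n : Int) (g1 g2 p : List String) (hG : pvG g1 g2)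
    (hg : g1 ≠ []) :
    pvCnt n (pvM g1 g2 + 1) g1 g2 p
      = 1 + ((pvTrim n p g1 g2).map (fun gi =>
          pvCnt n (pvM g2 ((pvTrim n p g1 g2).filter (pvKernel gi)) + 1)
            g2 ((pvTrim n p g1 g2).filter (pvKernel gi)) (p ++ [gi]))).sum := by
  rw [pvCnt_succ, if_pos hg]
  congr 1
  apply congrArg List.sum
  apply List.map_congr_left
  intro gi hgi
  have hGc := pvChild_good n p g1 g2 hG gi
  have hm := pvChild_m n p g1 g2 hG gi hgi
  exact pvCnt_stable n _ _ _ _ _ hGc (by omega) (by omega)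

lemma pvRunB_spec (n : Int) : ∀ f st res, pvGoodSt st → pvCostSt n st ≤ f →
    pvRunB n f st res = res ++ (st.map (fun fr => ncbf_recursive fr.1 fr.2.1 n fr.2.2)).flatten := by
  intro f
  induction f using Nat.strong_induction_on with
  | _ f IH =>
    intro st res hgood hcost
    match st with
    | [] =>
      cases f <;> simp [pvRunB]
    | (g1, g2, p) :: rest =>
      have hfrG : pvG g1 g2 := hgood (g1, g2, p) List.mem_cons_self
      have hcpos : 1 ≤ pvCnt n (pvM g1 g2 + 1) g1 g2 p := pvCnt_pos n _ _ _ _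
      have hcs : pvCostSt n ((g1, g2, p) :: rest)
          = pvCnt n (pvM g1 g2 + 1) g1 g2 p + pvCostSt n rest := by
        simp [pvCostSt]
      obtain ⟨k, rfl⟩ : ∃ k, f = k + 1 := ⟨f - 1, by omega⟩
      have hgoodrest : pvGoodSt rest := fun fr h => hgood fr (List.mem_cons_of_mem _ h)
      simp only [pvRunB]
      by_cases hg : g1 ≠ []
      · rw [if_pos hg]
        have hchildcost : pvCostSt n (pvChildren n g1 g2 p)
            = ((pvTrim n p g1 g2).map (fun gi =>
                pvCnt n (pvM g2 ((pvTrim n p g1 g2).filter (pvKernel gi)) + 1)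
                  g2 ((pvTrim n p g1 g2).filter (pvKernel gi)) (p ++ [gi]))).sum := by
          unfold pvCostSt pvChildren
          rw [List.map_map]
          rfl
        have hgoodch : pvGoodSt (pvChildren n g1 g2 p) := by
          intro fr hfr
          unfold pvChildren at hfr
          rw [List.mem_map] at hfr
          obtain ⟨gi, hgi, rfl⟩ := hfr
          exact pvChild_good n p g1 g2 hfrG gi
        have hcnt := pvCnt_unfold_rec n g1 g2 p hfrG hg
        have hcost2 : pvCostSt n (pvChildren n g1 g2 p ++ rest) ≤ k := by
          have hap : pvCostSt n (pvChildren n g1 g2 p ++ rest)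
              = pvCostSt n (pvChildren n g1 g2 p) + pvCostSt n rest := by
            simp [pvCostSt]
          omega
        have hgoodall : pvGoodSt (pvChildren n g1 g2 p ++ rest) := by
          intro fr hfr
          rcases List.mem_append.mp hfr with h | h
          · exact hgoodch fr h
          · exact hgoodrest fr h
        rw [IH k (by omega) _ res hgoodall hcost2]
        have hA : ((pvChildren n g1 g2 p).map (fun fr => ncbf_recursive fr.1 fr.2.1 n fr.2.2)).flatten
            = ncbf_recursive g1 g2 n p := by
          rw [pvA_unfold_rec n g1 g2 p hfrG hg]
          unfold pvChildren
          rw [List.map_map]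
          rfl
        simp only [List.map_cons, List.map_append, List.flatten_append, List.flatten_cons]
        rw [hA]
      · rw [if_neg hg]
        have hMb : pvM g1 g2 < 2 * (g1.length + g2.length) + 2 := by unfold pvM; split <;> omega
        have hAbase : ncbf_recursive g1 g2 n p
            = if g2 ≠ [] then
                g2.filterMap (fun layer => if pvLenOK n p layer then some (p ++ [layer]) else none)
              else [p] := by
          simp only [ncbf_recursive]
          rw [pvNcbfF_stable n (2 * (g1.length + g2.length) + 2) (pvM g1 g2 + 1) g1 g2 p hfrG hMb (by omega)]
          rw [pvNcbfF_succ, if_neg hg]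
        by_cases hg2 : g2 ≠ []
        · rw [if_pos hg2]
          rw [IH k (by omega) rest _ hgoodrest (by omega)]
          simp [hAbase, hg2, List.append_assoc]
        · rw [if_neg hg2]
          rw [IH k (by omega) rest _ hgoodrest (by omega)]
          simp [hAbase, hg2, List.append_assoc]

-- ===== VERDICT (by name: the statement is the Claim_ definition above) =====
theorem ncbf_recursive_spec : Claim_equal_ncbf_recursive := by
  intro g1 g2 n p _ hpre
  unfold Spec_ncbf_recursive ncbf_recursive_alt
  have hG : pvG g1 g2 := hpre
  have hMk : pvM g1 g2 ≤ 2 * (g1.length + g2.length) + 1 := by unfold pvM; split <;> omega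
  have hcost : pvCostSt n [(g1, g2, p)] ≤ Nat.factorial (2 * (g1.length + g2.length) + 2) := by
    have h := pvCnt_le_factorial n (2 * (g1.length + g2.length) + 1) g1 g2 p hG hMk
    simpa [pvCostSt] using h
  have hgood : pvGoodSt [(g1, g2, p)] := by
    intro fr hfr
    simp at hfr
    subst hfr
    exact hG
  rw [pvRunB_spec n _ [(g1, g2, p)] [] hgood hcost]
  simp
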